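-- pv_equiv track=rewrite | github.com/atifniyaz/RISCV-Skip-Table-Gen | find_skippable_regions.py | find_skippable_regions
-- ===== SOURCE A (Python) =====
-- from typing import Dict, List
--
-- def find_skippable_regions(globs: Dict[str, tuple]) -> List[tuple]:
--     sections = [x for x in globs]
--     skips = []
--     section_cnt = 0
--     i = 0
--     while i < len(sections):
--         lines = globs[sections[i]]
--         for k in range(0, len(lines)):
--             op, value = lines[k] # a0
--             if k != 0 and op == 'call':
--                 if value == '__mulsi3':
--                     globs[sections[i]] = lines[:k]
--                     sasa_skip_one = f'SASA_SKIP_{section_cnt}_0'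
--                     sasa_skip_two = f'SASA_SKIP_{section_cnt}_1'
--
--                     globs[sasa_skip_one] = [
--                         lines[k],
--                         ('j', sasa_skip_two),
--                         ('mv', 'a0,a1')
--                     ]
--
--                     globs[sasa_skip_two] = lines[k+1:]
--
--                     sections.insert(i+1, sasa_skip_two)
--                     sections.insert(i+1, sasa_skip_one)
--
--                     skips.append((sasa_skip_one, 10, 0, 'SASA_COND_AND', 1))
--                     skips.append((sasa_skip_one, 11, 0, 'SASA_COND_AND', 2))
--                 elif value == '__divsi3':
--                     globs[sections[i]] = lines[:k]
--                     sasa_skip_one = f'SASA_SKIP_{section_cnt}_0'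
--                     globs[sasa_skip_one] = lines[k:]
--
--                     sections.insert(i+1, sasa_skip_one)
--
--                     skips.append((sasa_skip_one, 10, 0, 'SASA_COND_AND', 1))
--                 section_cnt += 1
--                 break
--         i += 1
--     return sections, skips, globs
-- ===== SOURCE B (Python) =====
-- # B: staged decomposition -- per section, precompute the positions of all 'call' lines once,
-- # then fold over that position list with an absolute segment-start pointer, emitting every
-- # fragment of the split chain in one pass (no worklist, no re-reading of freshly inserted
-- # dict entries).  Mutates `globs` in place exactly as A does.
-- def find_skippable_regions(globs):
--     out, skips = [], []
--     cnt = 0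
--     for name in list(globs):
--         lines = globs[name]
--         calls = [p for p, line in enumerate(lines) if line[0] == 'call']
--         out.append(name)
--         cur, start = name, 0
--         for p in calls:
--             if p <= start:      # call at (or before) the head of the current segment: k == 0 case
--                 continue
--             value = lines[p][1]
--             c = cnt
--             cnt += 1
--             if value == '__mulsi3':
--                 one = f'SASA_SKIP_{c}_0'
--                 two = f'SASA_SKIP_{c}_1'
--                 globs[cur] = lines[start:p]
--                 globs[one] = [lines[p], ('j', two), ('mv', 'a0,a1')]
--                 globs[two] = lines[p + 1:]
--                 skips.append((one, 10, 0, 'SASA_COND_AND', 1))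
--                 skips.append((one, 11, 0, 'SASA_COND_AND', 2))
--                 out.append(one)
--                 out.append(two)
--                 cur, start = two, p + 1
--             elif value == '__divsi3':
--                 one = f'SASA_SKIP_{c}_0'
--                 globs[cur] = lines[start:p]
--                 globs[one] = lines[p:]
--                 skips.append((one, 10, 0, 'SASA_COND_AND', 1))
--                 out.append(one)
--                 cur, start = one, p
--             else:
--                 break
--     return out, skips, globs
-- ===== Notes on version B (the rewrite author's own statement) =====
-- stated objective: alternative
-- what changed: A drives a worklist: it inserts each newly created section into the iterated `sections` list and rescans it from the dict; B instead precomputes, per original section, the list of 'call' line positions in one pass and then folds over that position list with an absolute segment-start pointer, emitting the whole split chain without any worklist or re-reads of freshly inserted dict entries.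
import Mathlib
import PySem

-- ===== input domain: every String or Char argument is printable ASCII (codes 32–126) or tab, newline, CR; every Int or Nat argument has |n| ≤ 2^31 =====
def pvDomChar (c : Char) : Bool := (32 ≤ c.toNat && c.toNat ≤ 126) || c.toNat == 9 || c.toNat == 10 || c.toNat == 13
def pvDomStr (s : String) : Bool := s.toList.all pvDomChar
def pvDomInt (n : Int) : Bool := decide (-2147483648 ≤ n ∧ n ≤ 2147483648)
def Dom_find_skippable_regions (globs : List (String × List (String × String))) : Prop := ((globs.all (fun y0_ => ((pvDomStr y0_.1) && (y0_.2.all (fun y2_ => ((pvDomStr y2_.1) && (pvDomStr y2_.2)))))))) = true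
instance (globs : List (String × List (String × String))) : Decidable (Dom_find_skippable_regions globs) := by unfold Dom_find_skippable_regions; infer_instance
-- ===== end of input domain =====

-- B replaces A's self-growing worklist (insert into the iterated `sections` list, re-read the
-- dict for every new section) by a staged per-section pass: precompute the 'call' positions,
-- then fold over them with an absolute segment-start pointer; same return value (both Pythons
-- mutate the argument dict identically); objective: alternative decomposition, not faster.


-- shared small helpers: a skip tuple, the f-string f'SASA_SKIP_{cnt}_{suf}'
abbrev pvSkip : Type := String × Int × Int × String × Int
def pvName (cnt : Int) (suf : String) : String := "SASA_SKIP_" ++ PySem.Int.toStr cnt ++ suf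

-- termination measure for port A: number of 'call' ops at positions > 0, summed over the dict's values
def pvCost (lines : List (String × String)) : Nat := (lines.drop 1).countP (fun l => l.1 == "call")
def pvMass (g : PySem.Dict String (List (String × String))) : Nat :=
  (g.items.map (fun p => pvCost p.2)).sum

-- ===== PORT A =====
-- A's inner `for k in range(0, len(lines)) … if k != 0 and op == 'call': …; break` scan:
-- first index k with k ≠ 0 and op = 'call', together with that line's (op, value)
def pvScanA : Nat → List (String × String) → Option (Nat × String × String)
  | _, [] => none
  | k, (op, value) :: rest =>
    if k ≠ 0 ∧ op = "call" then some (k, op, value) else pvScanA (k+1) rest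

-- facts cited by the ports' termination proofs
theorem pvFind_facts (tl : List (String × String)) (j : Nat)
    (h : tl.findIdx? (fun l => l.1 == "call") = some j) :
    j < tl.length ∧ (tl.take j).countP (fun l => l.1 == "call") = 0 ∧
      tl.countP (fun l => l.1 == "call") = (tl.drop (j+1)).countP (fun l => l.1 == "call") + 1 := by
  rw [List.findIdx?_eq_some_iff_getElem] at h
  obtain ⟨hj, hp, hlt⟩ := h
  have htz : (tl.take j).countP (fun l => l.1 == "call") = 0 := by
    rw [List.countP_eq_zero]
    intro a ha
    rw [List.mem_take_iff_getElem] at ha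
    obtain ⟨i, hi, rfl⟩ := ha
    exact hlt i (by omega)
  refine ⟨hj, htz, ?_⟩
  conv_lhs => rw [← List.take_append_drop (j+1) tl]
  rw [List.countP_append, List.take_add_one, List.countP_append]
  have : tl[j]? = some tl[j] := List.getElem?_eq_getElem hj
  rw [this]
  simp [hp, htz]; omega

theorem pvCountP_tail_le (l : List (String × String)) :
    (l.drop 1).countP (fun q => q.1 == "call") ≤ l.countP (fun q => q.1 == "call") := by
  cases l with
  | nil => simp
  | cons x tl => simp only [List.drop_succ_cons, List.drop_zero, List.countP_cons]; omega

theorem pvScanA_aux (tl : List (String × String)) : ∀ (n : Nat), 1 ≤ n →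
    pvScanA n tl = (tl.findIdx? (fun l => l.1 == "call")).map
      (fun j => (n + j, (tl.getD j ("", "")).1, (tl.getD j ("", "")).2)) := by
  induction tl with
  | nil => intro n _; rfl
  | cons x tr ih =>
    intro n hn
    obtain ⟨op, value⟩ := x
    rw [List.findIdx?_cons]
    by_cases hc : op = "call"
    · subst hc
      rw [pvScanA, if_pos ⟨show n ≠ 0 by omega, rfl⟩]
      simp
    · have : ((op, value).1 == "call") = false := by simp [hc]
      rw [this]
      simp only [Bool.false_eq_true, if_false]
      rw [pvScanA]
      have hcond : ¬(n ≠ 0 ∧ op = "call") := by tauto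
      rw [if_neg hcond, ih (n+1) (by omega)]
      cases h : tr.findIdx? (fun l => l.1 == "call") with
      | none => rfl
      | some j => simp; omega

theorem pvScanA_some (lines : List (String × String)) (k : Nat) (op value : String)
    (h : pvScanA 0 lines = some (k, op, value)) :
    ∃ j, (lines.drop 1).findIdx? (fun l => l.1 == "call") = some j ∧ k = j + 1 := by
  cases lines with
  | nil => simp [pvScanA] at h
  | cons x tl =>
    obtain ⟨op', v'⟩ := x
    rw [show pvScanA 0 ((op', v') :: tl) = pvScanA 1 tl from by rw [pvScanA]; simp] at h
    rw [pvScanA_aux tl 1 (le_refl 1)] at h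
    cases hf : tl.findIdx? (fun l => l.1 == "call") with
    | none => rw [hf] at h; simp at h
    | some j =>
      rw [hf] at h
      simp only [Option.map_some, Option.some.injEq, Prod.mk.injEq] at h
      refine ⟨j, hf, ?_⟩
      omega

theorem pvSum_replace (k : String) (v : List (String × String)) :
    ∀ (l : List (String × List (String × String))) (w : List (String × String)),
    (l.map Prod.fst).Nodup → (k, w) ∈ l →
    ((l.map (fun p => if p.1 == k then (k, v) else p)).map (fun p => pvCost p.2)).sum + pvCost w
      = (l.map (fun p => pvCost p.2)).sum + pvCost v := by
  intro l
  induction l with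
  | nil => intro w _ hm; simp at hm
  | cons x tl ih =>
    intro w hn hm
    rw [List.mem_cons] at hm
    simp only [List.map_cons, List.nodup_cons] at hn ⊢
    by_cases hx : x.1 = k
    · rcases hm with rfl | hm
      · have hif : (if (((k, w)).1 == k) = true then (k, v) else (k, w)) = (k, v) := by simp
        rw [hif]
        have htl : List.map (fun p => if (p.1 == k) = true then (k, v) else p) tl = tl.map id := by
          apply List.map_congr_left
          intro a ha
          have hak : a.1 ≠ k := by
            intro hak
            exact hn.1 (by simpa [hak] using List.mem_map_of_mem (f := Prod.fst) ha)
          simp [hak]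
        rw [htl, List.map_id]
        simp only [List.sum_cons]
        omega
      · exfalso
        have := List.mem_map_of_mem (f := Prod.fst) hm
        rw [← hx] at this
        exact hn.1 this
    · have hm' : (k, w) ∈ tl := by
        rcases hm with rfl | hm
        · exact absurd rfl hx
        · exact hm
      have hxb : (x.1 == k) = false := by simp [hx]
      simp only [List.sum_cons, hxb, Bool.false_eq_true, if_false]
      have := ih w hn.2 hm'
      omega

theorem pvMass_insert (g : PySem.Dict String (List (String × String)))
    (hg : g.keys.Nodup) (k : String) (v : List (String × String)) :
    pvMass (g.insert k v) + pvCost (g.getD k []) = pvMass g + pvCost v := by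
  by_cases hc : g.contains k = true
  · have hk : k ∈ g.keys := (PySem.Dict.contains_iff_mem_keys g k).mp hc
    have hkeys : g.keys = g.items.map Prod.fst := rfl
    rw [hkeys] at hk
    obtain ⟨p, hp, hpk⟩ := List.mem_map.mp hk
    obtain ⟨k', w⟩ := p
    obtain rfl : k = k' := hpk.symm
    have hgd : g.getD k [] = w := PySem.Dict.getD_of_mem_items g hp hg []
    rw [hgd]
    unfold pvMass
    rw [PySem.Dict.items_insert_of_contains g v hc]
    exact pvSum_replace k v g.items w (hkeys ▸ hg) hp
  · have hcf : g.contains k = false := by simpa using hc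
    have hgd : g.getD k [] = [] := PySem.Dict.getD_of_not_contains g [] hcf
    unfold pvMass
    rw [PySem.Dict.items_insert_of_not_contains g v hcf]
    simp [hgd, pvCost]

theorem pvMass_mul_lt (g : PySem.Dict String (List (String × String))) (hg : g.keys.Nodup)
    (name one two : String) (lines : List (String × String)) (j : Nat) (stub0 : String × String)
    (hl : lines = (g.get? name).getD [])
    (hj : (lines.drop 1).findIdx? (fun l => l.1 == "call") = some j) :
    pvMass (((g.insert name (lines.take (j+1))).insert one
        [stub0, ("j", two), ("mv", "a0,a1")]).insert two (lines.drop (j+1+1))) < pvMass g := by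
  obtain ⟨hjl, htz, hcnt⟩ := pvFind_facts _ j hj
  have hgdname : g.getD name [] = lines := by rw [PySem.Dict.getD_eq_get?_getD, hl]
  have h1 := pvMass_insert g hg name (lines.take (j+1))
  have hn1 := PySem.Dict.nodup_keys_insert g name (lines.take (j+1)) hg
  have h2 := pvMass_insert _ hn1 one [stub0, ("j", two), ("mv", "a0,a1")]
  have hn2 := PySem.Dict.nodup_keys_insert _ one [stub0, ("j", two), ("mv", "a0,a1")] hn1
  have h3 := pvMass_insert _ hn2 two (lines.drop (j+1+1))
  have htake : pvCost (lines.take (j+1)) = 0 := by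
    unfold pvCost
    cases lines with
    | nil => simp
    | cons x tl => simpa using htz
  have hstub : pvCost [stub0, ("j", two), ("mv", "a0,a1")] = 0 := by
    simp [pvCost]
  have hlc : pvCost lines = ((lines.drop 1).drop (j+1)).countP (fun l => l.1 == "call") + 1 := hcnt
  have hdrop : pvCost (lines.drop (j+1+1)) ≤ ((lines.drop 1).drop (j+1)).countP (fun l => l.1 == "call") := by
    have : lines.drop (j+1+1) = (lines.drop 1).drop (j+1) := by
      rw [List.drop_drop]; congr 1; omega
    rw [this]
    exact pvCountP_tail_le _
  rw [hgdname] at h1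
  omega

theorem pvMass_div_lt (g : PySem.Dict String (List (String × String))) (hg : g.keys.Nodup)
    (name one : String) (lines : List (String × String)) (j : Nat)
    (hl : lines = (g.get? name).getD [])
    (hj : (lines.drop 1).findIdx? (fun l => l.1 == "call") = some j) :
    pvMass ((g.insert name (lines.take (j+1))).insert one (lines.drop (j+1))) < pvMass g := by
  obtain ⟨hjl, htz, hcnt⟩ := pvFind_facts _ j hj
  have hgdname : g.getD name [] = lines := by rw [PySem.Dict.getD_eq_get?_getD, hl]
  have h1 := pvMass_insert g hg name (lines.take (j+1))
  have hn1 := PySem.Dict.nodup_keys_insert g name (lines.take (j+1)) hg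
  have h2 := pvMass_insert _ hn1 one (lines.drop (j+1))
  have htake : pvCost (lines.take (j+1)) = 0 := by
    unfold pvCost
    cases lines with
    | nil => simp
    | cons x tl => simpa using htz
  have hdrop : pvCost (lines.drop (j+1)) ≤ ((lines.drop 1).drop (j+1)).countP (fun l => l.1 == "call") := by
    apply le_of_eq
    unfold pvCost
    have hdd : (lines.drop (j+1)).drop 1 = (lines.drop 1).drop (j+1) := by
      rw [List.drop_drop, List.drop_drop]
      congr 1
      omega
    rw [hdd]
  have hlc : pvCost lines = ((lines.drop 1).drop (j+1)).countP (fun l => l.1 == "call") + 1 := hcnt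
  rw [hgdname] at h1
  omega

-- the port of A's while loop: `sections` grows in place, `i` walks it
def pvLoopA (sections : List String) (i : Nat) (skips : List pvSkip) (cnt : Int)
    (g : PySem.Dict String (List (String × String))) (hg : g.keys.Nodup) :
    List String × List pvSkip × PySem.Dict String (List (String × String)) :=
  if hlt : i < sections.length then
    -- globs[sections[i]]: the scanned name is always a key, so getD [] is never used
    let lines := (g.get? sections[i]).getD []
    match hscan : pvScanA 0 lines with
    | none => pvLoopA sections (i+1) skips cnt g hg
    | some (k, op, value) =>
      if value = "__mulsi3" then
        pvLoopA
          (sections.take (i+1) ++ [pvName cnt "_0", pvName cnt "_1"] ++ sections.drop (i+1))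
          (i+1)
          (skips ++ [(pvName cnt "_0", 10, 0, "SASA_COND_AND", 1),
                     (pvName cnt "_0", 11, 0, "SASA_COND_AND", 2)])
          (cnt+1)
          (((g.insert sections[i] (lines.take k)).insert (pvName cnt "_0")
              [(op, value), ("j", pvName cnt "_1"), ("mv", "a0,a1")]).insert
            (pvName cnt "_1") (lines.drop (k+1)))
          (by
            exact PySem.Dict.nodup_keys_insert _ _ _
              (PySem.Dict.nodup_keys_insert _ _ _ (PySem.Dict.nodup_keys_insert _ _ _ hg)))
      else if value = "__divsi3" then
        pvLoopA
          (sections.take (i+1) ++ [pvName cnt "_0"] ++ sections.drop (i+1))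
          (i+1)
          (skips ++ [(pvName cnt "_0", 10, 0, "SASA_COND_AND", 1)])
          (cnt+1)
          ((g.insert sections[i] (lines.take k)).insert (pvName cnt "_0") (lines.drop k))
          (by exact PySem.Dict.nodup_keys_insert _ _ _ (PySem.Dict.nodup_keys_insert _ _ _ hg))
      else pvLoopA sections (i+1) skips (cnt+1) g hg
  else (sections, skips, g)
  termination_by 2 * pvMass g + (sections.length - i)
  decreasing_by
  · omega
  · obtain ⟨j, hj, hk⟩ := pvScanA_some lines k op value hscan
    subst hk
    have hm := pvMass_mul_lt g hg sections[i] (pvName cnt "_0") (pvName cnt "_1")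
      ((g.get? sections[i]).getD []) j (op, value) rfl hj
    have hlen : (sections.take (i+1) ++ [pvName cnt "_0", pvName cnt "_1"] ++
        sections.drop (i+1)).length = sections.length + 2 := by
      simp
      omega
    omega
  · obtain ⟨j, hj, hk⟩ := pvScanA_some lines k op value hscan
    subst hk
    have hm := pvMass_div_lt g hg sections[i] (pvName cnt "_0")
      ((g.get? sections[i]).getD []) j rfl hj
    have hlen : (sections.take (i+1) ++ [pvName cnt "_0"] ++
        sections.drop (i+1)).length = sections.length + 1 := by
      simp
    omega
  · omega

def find_skippable_regions (globs : List (String × List (String × String))) : List String × (List (String × Int × Int × String × Int)) × (List (String × List (String × String))) :=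
  let g := PySem.Dict.ofList globs
  let r := pvLoopA g.keys 0 [] 0 g (PySem.Dict.nodup_keys_ofList globs)
  (r.1, r.2.1, r.2.2.items)

-- ===== PORT B =====
-- B's first stage: `calls = [p for p, line in enumerate(lines) if line[0] == 'call']`
def pvCalls (lines : List (String × String)) : List Int :=
  (PySem.List.enumerate lines 0).filterMap (fun pl => if pl.2.1 == "call" then some pl.1 else none)

-- B's second stage: `for p in calls: …` with the absolute segment-start pointer `start`;
-- `lines[p]` is ported with pyGetD (exact: every p comes from enumerate, so 0 ≤ p < len)
def pvSplit (lines : List (String × String)) (calls : List Int) (cur : String) (start : Int)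
    (out : List String) (skips : List pvSkip) (cnt : Int)
    (g : PySem.Dict String (List (String × String))) :
    List String × List pvSkip × Int × PySem.Dict String (List (String × String)) :=
  match calls with
  | [] => (out, skips, cnt, g)
  | p :: rest =>
    if p ≤ start then pvSplit lines rest cur start out skips cnt g
    else
      if (PySem.List.pyGetD lines p ("", "")).2 = "__mulsi3" then
        pvSplit lines rest (pvName cnt "_1") (p+1)
          (out ++ [pvName cnt "_0", pvName cnt "_1"])
          (skips ++ [(pvName cnt "_0", 10, 0, "SASA_COND_AND", 1),
                     (pvName cnt "_0", 11, 0, "SASA_COND_AND", 2)])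
          (cnt+1)
          (((g.insert cur (PySem.List.slice lines (some start) (some p))).insert (pvName cnt "_0")
              [PySem.List.pyGetD lines p ("", ""), ("j", pvName cnt "_1"), ("mv", "a0,a1")]).insert
            (pvName cnt "_1") (PySem.List.slice lines (some (p+1)) none))
      else if (PySem.List.pyGetD lines p ("", "")).2 = "__divsi3" then
        pvSplit lines rest (pvName cnt "_0") p
          (out ++ [pvName cnt "_0"])
          (skips ++ [(pvName cnt "_0", 10, 0, "SASA_COND_AND", 1)])
          (cnt+1)
          ((g.insert cur (PySem.List.slice lines (some start) (some p))).insert (pvName cnt "_0")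
            (PySem.List.slice lines (some p) none))
      else (out, skips, cnt+1, g)   -- the `break`

-- B's outer `for name in list(globs)` loop
def pvRunB (names : List String) (out : List String) (skips : List pvSkip) (cnt : Int)
    (g : PySem.Dict String (List (String × String))) :
    List String × List pvSkip × PySem.Dict String (List (String × String)) :=
  match names with
  | [] => (out, skips, g)
  | n :: rest =>
    let lines := (g.get? n).getD []
    let r := pvSplit lines (pvCalls lines) n 0 (out ++ [n]) skips cnt g
    pvRunB rest r.1 r.2.1 r.2.2.1 r.2.2.2

def find_skippable_regions_alt (globs : List (String × List (String × String))) : List String × (List (String × Int × Int × String × Int)) × (List (String × List (String × String))) :=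
  let g := PySem.Dict.ofList globs
  let r := pvRunB g.keys [] [] 0 g
  (r.1, r.2.1, r.2.2.items)

-- ===== PRECONDITION & SPEC =====
def Spec_find_skippable_regions (globs : List (String × List (String × String))) (out : List String × (List (String × Int × Int × String × Int)) × (List (String × List (String × String)))) : Prop := out = find_skippable_regions_alt globs
instance (globs : List (String × List (String × String))) (out : List String × (List (String × Int × Int × String × Int)) × (List (String × List (String × String)))) : Decidable (Spec_find_skippable_regions globs out) := by
  unfold Spec_find_skippable_regions
  exact @instDecidableEqProd _ _ inferInstance
    (@instDecidableEqProd _ _ inferInstance inferInstance) _ _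

-- ===== CLAIM (what is proved, stated in full; the proofs are below) =====
def Claim_equal_find_skippable_regions : Prop := ∀ (globs : List (String × List (String × String))), Dom_find_skippable_regions globs → Spec_find_skippable_regions globs (find_skippable_regions globs)

-- ===== LEMMAS AND PROOFS =====

theorem pvName_ne (cnt : Int) : pvName cnt "_0" ≠ pvName cnt "_1" := by
  unfold pvName
  intro h
  have h2 := congrArg String.toList h
  simp only [String.toList_append] at h2
  have := List.append_cancel_left h2
  simp at this

-- proof-only intermediate: A's chain, phrased as B's previous-style dict-driven recursion.
-- pvScanB: first index k ≥ 1 whose op is 'call' (none if absent)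
def pvScanB (lines : List (String × String)) : Option Nat :=
  match lines with
  | [] => none
  | _ :: tl => (tl.findIdx? (fun l => l.1 == "call")).map (· + 1)

theorem pvScanB_some (lines : List (String × String)) (k : Nat)
    (h : pvScanB lines = some k) :
    ∃ j, (lines.drop 1).findIdx? (fun l => l.1 == "call") = some j ∧ k = j + 1 := by
  cases lines with
  | nil => simp [pvScanB] at h
  | cons x tl =>
    rw [pvScanB] at h
    cases hf : tl.findIdx? (fun l => l.1 == "call") with
    | none => rw [hf] at h; simp at h
    | some j =>
      rw [hf] at h
      simp only [Option.map_some, Option.some.injEq] at h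
      exact ⟨j, hf, h.symm⟩

-- proof-only: the chain of splits starting at `name`, reading the dict at each step
def pvProcess (name : String) (skips : List pvSkip) (cnt : Int)
    (g : PySem.Dict String (List (String × String))) (hg : g.keys.Nodup) :
    List String × List pvSkip × Int × PySem.Dict String (List (String × String)) :=
  let lines := (g.get? name).getD []
  match hscan : pvScanB lines with
  | none => ([name], skips, cnt, g)
  | some k =>
    let ln := lines.getD k ("", "")
    if ln.2 = "__mulsi3" then
      let res := pvProcess (pvName cnt "_1")
        (skips ++ [(pvName cnt "_0", 10, 0, "SASA_COND_AND", 1),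
                   (pvName cnt "_0", 11, 0, "SASA_COND_AND", 2)])
        (cnt+1)
        (((g.insert name (lines.take k)).insert (pvName cnt "_0")
            [ln, ("j", pvName cnt "_1"), ("mv", "a0,a1")]).insert
          (pvName cnt "_1") (lines.drop (k+1)))
        (by
          exact PySem.Dict.nodup_keys_insert _ _ _
            (PySem.Dict.nodup_keys_insert _ _ _ (PySem.Dict.nodup_keys_insert _ _ _ hg)))
      (name :: pvName cnt "_0" :: res.1, res.2)
    else if ln.2 = "__divsi3" then
      let res := pvProcess (pvName cnt "_0")
        (skips ++ [(pvName cnt "_0", 10, 0, "SASA_COND_AND", 1)])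
        (cnt+1)
        ((g.insert name (lines.take k)).insert (pvName cnt "_0") (lines.drop k))
        (by exact PySem.Dict.nodup_keys_insert _ _ _ (PySem.Dict.nodup_keys_insert _ _ _ hg))
      (name :: res.1, res.2)
    else ([name], skips, cnt+1, g)
  termination_by pvMass g
  decreasing_by
  · obtain ⟨j, hj, hk⟩ := pvScanB_some lines k hscan
    subst hk
    exact pvMass_mul_lt g hg name (pvName cnt "_0") (pvName cnt "_1") lines j
      (lines.getD (j+1) ("", "")) rfl hj
  · obtain ⟨j, hj, hk⟩ := pvScanB_some lines k hscan
    subst hk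
    exact pvMass_div_lt g hg name (pvName cnt "_0") lines j rfl hj

theorem pvProcess_eq_none (name : String) (skips : List pvSkip) (cnt : Int)
    (g : PySem.Dict String (List (String × String))) (hg : g.keys.Nodup)
    (h : pvScanB ((g.get? name).getD []) = none) :
    pvProcess name skips cnt g hg = ([name], skips, cnt, g) := by
  rw [pvProcess]
  split
  · rfl
  · rename_i k heq
    rw [h] at heq
    cases heq

theorem pvProcess_eq_mul (name : String) (skips : List pvSkip) (cnt : Int)
    (g : PySem.Dict String (List (String × String))) (hg : g.keys.Nodup) (k : Nat)
    (h : pvScanB ((g.get? name).getD []) = some k)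
    (hmul : (((g.get? name).getD []).getD k ("", "")).2 = "__mulsi3") :
    pvProcess name skips cnt g hg =
      (name :: pvName cnt "_0" ::
        (pvProcess (pvName cnt "_1")
          (skips ++ [(pvName cnt "_0", 10, 0, "SASA_COND_AND", 1),
                     (pvName cnt "_0", 11, 0, "SASA_COND_AND", 2)])
          (cnt+1)
          (((g.insert name (((g.get? name).getD []).take k)).insert (pvName cnt "_0")
              [((g.get? name).getD []).getD k ("", ""), ("j", pvName cnt "_1"), ("mv", "a0,a1")]).insert
            (pvName cnt "_1") (((g.get? name).getD []).drop (k+1)))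
          (PySem.Dict.nodup_keys_insert _ _ _
            (PySem.Dict.nodup_keys_insert _ _ _ (PySem.Dict.nodup_keys_insert _ _ _ hg)))).1,
       (pvProcess (pvName cnt "_1")
          (skips ++ [(pvName cnt "_0", 10, 0, "SASA_COND_AND", 1),
                     (pvName cnt "_0", 11, 0, "SASA_COND_AND", 2)])
          (cnt+1)
          (((g.insert name (((g.get? name).getD []).take k)).insert (pvName cnt "_0")
              [((g.get? name).getD []).getD k ("", ""), ("j", pvName cnt "_1"), ("mv", "a0,a1")]).insert
            (pvName cnt "_1") (((g.get? name).getD []).drop (k+1)))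
          (PySem.Dict.nodup_keys_insert _ _ _
            (PySem.Dict.nodup_keys_insert _ _ _ (PySem.Dict.nodup_keys_insert _ _ _ hg)))).2) := by
  rw [pvProcess]
  split
  · rename_i heq
    rw [h] at heq
    cases heq
  · rename_i k' heq
    rw [h] at heq
    injection heq with heq
    subst heq
    rw [if_pos hmul]

theorem pvProcess_eq_div (name : String) (skips : List pvSkip) (cnt : Int)
    (g : PySem.Dict String (List (String × String))) (hg : g.keys.Nodup) (k : Nat)
    (h : pvScanB ((g.get? name).getD []) = some k)
    (hnm : ¬ (((g.get? name).getD []).getD k ("", "")).2 = "__mulsi3")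
    (hdiv : (((g.get? name).getD []).getD k ("", "")).2 = "__divsi3") :
    pvProcess name skips cnt g hg =
      (name ::
        (pvProcess (pvName cnt "_0")
          (skips ++ [(pvName cnt "_0", 10, 0, "SASA_COND_AND", 1)])
          (cnt+1)
          ((g.insert name (((g.get? name).getD []).take k)).insert (pvName cnt "_0")
            (((g.get? name).getD []).drop k))
          (PySem.Dict.nodup_keys_insert _ _ _ (PySem.Dict.nodup_keys_insert _ _ _ hg))).1,
       (pvProcess (pvName cnt "_0")
          (skips ++ [(pvName cnt "_0", 10, 0, "SASA_COND_AND", 1)])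
          (cnt+1)
          ((g.insert name (((g.get? name).getD []).take k)).insert (pvName cnt "_0")
            (((g.get? name).getD []).drop k))
          (PySem.Dict.nodup_keys_insert _ _ _ (PySem.Dict.nodup_keys_insert _ _ _ hg))).2) := by
  rw [pvProcess]
  split
  · rename_i heq
    rw [h] at heq
    cases heq
  · rename_i k' heq
    rw [h] at heq
    injection heq with heq
    subst heq
    rw [if_neg hnm, if_pos hdiv]

theorem pvProcess_eq_other (name : String) (skips : List pvSkip) (cnt : Int)
    (g : PySem.Dict String (List (String × String))) (hg : g.keys.Nodup) (k : Nat)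
    (h : pvScanB ((g.get? name).getD []) = some k)
    (hnm : ¬ (((g.get? name).getD []).getD k ("", "")).2 = "__mulsi3")
    (hnd : ¬ (((g.get? name).getD []).getD k ("", "")).2 = "__divsi3") :
    pvProcess name skips cnt g hg = ([name], skips, cnt+1, g) := by
  rw [pvProcess]
  split
  · rename_i heq
    rw [h] at heq
    cases heq
  · rename_i k' heq
    rw [h] at heq
    injection heq with heq
    subst heq
    rw [if_neg hnm, if_neg hnd]

theorem pvProcess_nodup (name : String) (skips : List pvSkip) (cnt : Int)
    (g : PySem.Dict String (List (String × String))) (hg : g.keys.Nodup) :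
    (pvProcess name skips cnt g hg).2.2.2.keys.Nodup := by
  induction name, skips, cnt, g, hg using pvProcess.induct with
  | case1 name skips cnt g hg lines hscan =>
    rw [pvProcess_eq_none name skips cnt g hg hscan]
    exact hg
  | case2 name skips cnt g hg lines k hscan ln hmul ih =>
    rw [pvProcess_eq_mul name skips cnt g hg k hscan hmul]
    exact ih
  | case3 name skips cnt g hg lines k hscan ln hnm hdiv ih =>
    rw [pvProcess_eq_div name skips cnt g hg k hscan hnm hdiv]
    exact ih
  | case4 name skips cnt g hg lines k hscan ln hnm hnd =>
    rw [pvProcess_eq_other name skips cnt g hg k hscan hnm hnd]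
    exact hg

-- proof-only: the concatenation of chains over a list of names
def pvRun (names : List String) (skips : List pvSkip) (cnt : Int)
    (g : PySem.Dict String (List (String × String))) (hg : g.keys.Nodup) :
    List String × List pvSkip × PySem.Dict String (List (String × String)) :=
  match names with
  | [] => ([], skips, g)
  | n :: rest =>
    let r := pvProcess n skips cnt g hg
    let rr := pvRun rest r.2.1 r.2.2.1 r.2.2.2 (pvProcess_nodup n skips cnt g hg)
    (r.1 ++ rr.1, rr.2)

-- pvScanA agrees with the dict-chain scan
theorem pvScanA_eq (lines : List (String × String)) :
    pvScanA 0 lines =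
      (pvScanB lines).map
        (fun k => (k, (lines.getD k ("", "")).1, (lines.getD k ("", "")).2)) := by
  cases lines with
  | nil => rfl
  | cons x tl =>
    obtain ⟨op, value⟩ := x
    rw [pvScanB]
    rw [show pvScanA 0 ((op, value) :: tl) = pvScanA 1 tl from by rw [pvScanA]; simp]
    rw [pvScanA_aux tl 1 (by omega)]
    cases h : tl.findIdx? (fun l => l.1 == "call") with
    | none => rfl
    | some j => simp; omega

theorem pvScanAB_some (lines : List (String × String)) (k : Nat) (op value : String)
    (h : pvScanA 0 lines = some (k, op, value)) :
    pvScanB lines = some k ∧ lines.getD k ("", "") = (op, value) := by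
  rw [pvScanA_eq] at h
  cases hb : pvScanB lines with
  | none => rw [hb] at h; cases h
  | some k' =>
    rw [hb] at h
    simp only [Option.map_some, Option.some.injEq, Prod.mk.injEq] at h
    obtain ⟨rfl, h2, h3⟩ := h
    exact ⟨rfl, Prod.ext h2 h3⟩

theorem pvScanAB_none (lines : List (String × String))
    (h : pvScanA 0 lines = none) : pvScanB lines = none := by
  rw [pvScanA_eq] at h
  cases hb : pvScanB lines with
  | none => rfl
  | some k' => rw [hb] at h; cases h

theorem pvStub_scan (x : String × String) (s : String) :
    pvScanB [x, ("j", s), ("mv", "a0,a1")] = none := by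
  rw [pvScanB]
  simp [List.findIdx?_cons]

theorem pvLoopA_eq_term (sections : List String) (i : Nat) (skips : List pvSkip) (cnt : Int)
    (g : PySem.Dict String (List (String × String))) (hg : g.keys.Nodup)
    (h : ¬ i < sections.length) :
    pvLoopA sections i skips cnt g hg = (sections, skips, g) := by
  rw [pvLoopA, dif_neg h]

theorem pvLoopA_eq_none (sections : List String) (i : Nat) (skips : List pvSkip) (cnt : Int)
    (g : PySem.Dict String (List (String × String))) (hg : g.keys.Nodup)
    (hlt : i < sections.length)
    (h : pvScanA 0 ((g.get? sections[i]).getD []) = none) :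
    pvLoopA sections i skips cnt g hg = pvLoopA sections (i+1) skips cnt g hg := by
  rw [pvLoopA, dif_pos hlt]
  dsimp only []
  split
  · rfl
  · rename_i k op value heq
    rw [h] at heq
    cases heq

theorem pvLoopA_eq_mul (sections : List String) (i : Nat) (skips : List pvSkip) (cnt : Int)
    (g : PySem.Dict String (List (String × String))) (hg : g.keys.Nodup)
    (hlt : i < sections.length) (k : Nat) (op value : String)
    (h : pvScanA 0 ((g.get? sections[i]).getD []) = some (k, op, value))
    (hmul : value = "__mulsi3") :
    pvLoopA sections i skips cnt g hg =
      pvLoopA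
        (sections.take (i+1) ++ [pvName cnt "_0", pvName cnt "_1"] ++ sections.drop (i+1))
        (i+1)
        (skips ++ [(pvName cnt "_0", 10, 0, "SASA_COND_AND", 1),
                   (pvName cnt "_0", 11, 0, "SASA_COND_AND", 2)])
        (cnt+1)
        (((g.insert sections[i] (((g.get? sections[i]).getD []).take k)).insert (pvName cnt "_0")
            [(op, value), ("j", pvName cnt "_1"), ("mv", "a0,a1")]).insert
          (pvName cnt "_1") (((g.get? sections[i]).getD []).drop (k+1)))
        (PySem.Dict.nodup_keys_insert _ _ _
          (PySem.Dict.nodup_keys_insert _ _ _ (PySem.Dict.nodup_keys_insert _ _ _ hg))) := by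
  rw [pvLoopA, dif_pos hlt]
  dsimp only []
  split
  · rename_i heq
    rw [h] at heq
    cases heq
  · rename_i k' op' value' heq
    rw [h] at heq
    injection heq with heq
    simp only [Prod.mk.injEq] at heq
    obtain ⟨rfl, rfl, rfl⟩ := heq
    rw [if_pos hmul]

theorem pvLoopA_eq_div (sections : List String) (i : Nat) (skips : List pvSkip) (cnt : Int)
    (g : PySem.Dict String (List (String × String))) (hg : g.keys.Nodup)
    (hlt : i < sections.length) (k : Nat) (op value : String)
    (h : pvScanA 0 ((g.get? sections[i]).getD []) = some (k, op, value))
    (hnm : ¬ value = "__mulsi3") (hdiv : value = "__divsi3") :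
    pvLoopA sections i skips cnt g hg =
      pvLoopA
        (sections.take (i+1) ++ [pvName cnt "_0"] ++ sections.drop (i+1))
        (i+1)
        (skips ++ [(pvName cnt "_0", 10, 0, "SASA_COND_AND", 1)])
        (cnt+1)
        ((g.insert sections[i] (((g.get? sections[i]).getD []).take k)).insert (pvName cnt "_0")
          (((g.get? sections[i]).getD []).drop k))
        (PySem.Dict.nodup_keys_insert _ _ _ (PySem.Dict.nodup_keys_insert _ _ _ hg)) := by
  rw [pvLoopA, dif_pos hlt]
  dsimp only []
  split
  · rename_i heq
    rw [h] at heq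
    cases heq
  · rename_i k' op' value' heq
    rw [h] at heq
    injection heq with heq
    simp only [Prod.mk.injEq] at heq
    obtain ⟨rfl, rfl, rfl⟩ := heq
    rw [if_neg hnm, if_pos hdiv]

theorem pvLoopA_eq_other (sections : List String) (i : Nat) (skips : List pvSkip) (cnt : Int)
    (g : PySem.Dict String (List (String × String))) (hg : g.keys.Nodup)
    (hlt : i < sections.length) (k : Nat) (op value : String)
    (h : pvScanA 0 ((g.get? sections[i]).getD []) = some (k, op, value))
    (hnm : ¬ value = "__mulsi3") (hnd : ¬ value = "__divsi3") :
    pvLoopA sections i skips cnt g hg = pvLoopA sections (i+1) skips (cnt+1) g hg := by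
  rw [pvLoopA, dif_pos hlt]
  dsimp only []
  split
  · rename_i heq
    rw [h] at heq
    cases heq
  · rename_i k' op' value' heq
    rw [h] at heq
    injection heq with heq
    simp only [Prod.mk.injEq] at heq
    obtain ⟨rfl, rfl, rfl⟩ := heq
    rw [if_neg hnm, if_neg hnd]

theorem pvLoopA_eq_run (sections : List String) (i : Nat) (skips : List pvSkip) (cnt : Int)
    (g : PySem.Dict String (List (String × String))) (hg : g.keys.Nodup) :
    pvLoopA sections i skips cnt g hg =
      (sections.take i ++ (pvRun (sections.drop i) skips cnt g hg).1,
       (pvRun (sections.drop i) skips cnt g hg).2) := by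
  induction sections, i, skips, cnt, g, hg using pvLoopA.induct with
  | case1 sections i skips cnt g hg hlt lines hscan ih =>
    rw [pvLoopA_eq_none sections i skips cnt g hg hlt hscan, ih]
    have hd : sections.drop i = sections[i] :: sections.drop (i+1) :=
      List.drop_eq_getElem_cons hlt
    rw [hd]
    simp only [pvRun]
    simp only [pvProcess_eq_none sections[i] skips cnt g hg (pvScanAB_none _ hscan)]
    rw [← List.append_assoc]
    rw [show List.take i sections ++ [sections[i]] = List.take (i+1) sections from by
      rw [List.take_add_one, List.getElem?_eq_getElem hlt]; simp]
  | case2 sections i skips cnt g hg hlt lines k op hscan ih =>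
    obtain ⟨hsB, hpair⟩ := pvScanAB_some lines k op "__mulsi3" hscan
    have hL : (g.get? sections[i]).getD ([] : List (String × String)) = lines := rfl
    rw [pvLoopA_eq_mul sections i skips cnt g hg hlt k op "__mulsi3" hscan rfl, ih]
    have hlen : (sections.take (i+1)).length = i+1 := by simp; omega
    rw [List.append_assoc, List.drop_left' hlen, List.take_left' hlen]
    have hd : sections.drop i = sections[i] :: sections.drop (i+1) :=
      List.drop_eq_getElem_cons hlt
    rw [hd]
    simp only [List.cons_append, List.nil_append, pvRun]
    simp only [pvProcess_eq_mul sections[i] skips cnt g hg k hsB (by rw [hL, hpair])]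
    simp only [hL, hpair]
    have hone : ((((g.insert sections[i] (lines.take k)).insert (pvName cnt "_0")
        [(op, "__mulsi3"), ("j", pvName cnt "_1"), ("mv", "a0,a1")]).insert
        (pvName cnt "_1") (lines.drop (k+1))).get? (pvName cnt "_0")).getD []
        = [(op, "__mulsi3"), ("j", pvName cnt "_1"), ("mv", "a0,a1")] := by
      rw [PySem.Dict.get?_insert_of_ne _ _ (pvName_ne cnt), PySem.Dict.get?_insert_self]
      rfl
    simp only [pvProcess_eq_none _ _ _ _ _ (by rw [hone]; exact pvStub_scan _ _)]
    have htake : List.take (i+1) sections = List.take i sections ++ [sections[i]] := by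
      rw [List.take_add_one, List.getElem?_eq_getElem hlt]; simp
    rw [htake, List.append_assoc]
    rfl
  | case3 sections i skips cnt g hg hlt lines k op hscan hnm ih =>
    obtain ⟨hsB, hpair⟩ := pvScanAB_some lines k op "__divsi3" hscan
    have hL : (g.get? sections[i]).getD ([] : List (String × String)) = lines := rfl
    rw [pvLoopA_eq_div sections i skips cnt g hg hlt k op "__divsi3" hscan hnm rfl, ih]
    have hlen : (sections.take (i+1)).length = i+1 := by simp; omega
    rw [List.append_assoc, List.drop_left' hlen, List.take_left' hlen]
    have hd : sections.drop i = sections[i] :: sections.drop (i+1) :=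
      List.drop_eq_getElem_cons hlt
    rw [hd]
    simp only [List.cons_append, List.nil_append, pvRun]
    have hval : (((g.get? sections[i]).getD []).getD k ("", "")).2 = "__divsi3" :=
      congrArg Prod.snd hpair
    simp only [pvProcess_eq_div sections[i] skips cnt g hg k hsB (by rw [hval]; decide) hval]
    simp only [hL]
    have htake : List.take (i+1) sections = List.take i sections ++ [sections[i]] := by
      rw [List.take_add_one, List.getElem?_eq_getElem hlt]; simp
    rw [htake, List.append_assoc]
    rfl
  | case4 sections i skips cnt g hg hlt lines k op value hscan hnm hnd ih =>
    rw [pvLoopA_eq_other sections i skips cnt g hg hlt k op value hscan hnm hnd, ih]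
    obtain ⟨hsB, hpair⟩ := pvScanAB_some lines k op value hscan
    have hd : sections.drop i = sections[i] :: sections.drop (i+1) :=
      List.drop_eq_getElem_cons hlt
    rw [hd]
    simp only [pvRun]
    have hval : (((g.get? sections[i]).getD []).getD k ("", "")).2 = value :=
      congrArg Prod.snd hpair
    simp only [pvProcess_eq_other sections[i] skips cnt g hg k hsB
      (by rw [hval]; exact hnm) (by rw [hval]; exact hnd)]
    have htake : List.take (i+1) sections = List.take i sections ++ [sections[i]] := by
      rw [List.take_add_one, List.getElem?_eq_getElem hlt]; simp
    rw [htake, List.append_assoc]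
  | case5 sections i skips cnt g hg hlt =>
    rw [pvLoopA_eq_term sections i skips cnt g hg hlt,
      List.drop_eq_nil_of_le (by omega), List.take_of_length_le (by omega)]
    simp [pvRun]

-- ===== B-side bridging lemmas =====

theorem pvGetD_drop {α : Type} [Inhabited α] (l : List α) (m j : Nat) (d : α) :
    (l.drop m).getD j d = l.getD (m + j) d := by
  simp [List.getD_eq_getElem?_getD, List.getElem?_drop]

theorem pvCalls_mem (lines : List (String × String)) (q : Int) :
    q ∈ pvCalls lines ↔
      ∃ k : Nat, q = (k : Int) ∧ k < lines.length ∧ (lines.getD k ("", "")).1 = "call" := by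
  unfold pvCalls
  rw [List.mem_filterMap]
  constructor
  · rintro ⟨pl, hpl, hif⟩
    rw [PySem.List.mem_enumerate_iff] at hpl
    obtain ⟨k, hk, rfl⟩ := hpl
    by_cases hc : lines[k].1 = "call"
    · refine ⟨k, ?_, hk, ?_⟩
      · simp at hif
        omega
      · rw [List.getD_eq_getElem?_getD, List.getElem?_eq_getElem hk]
        simpa using hc
    · simp [hc] at hif
  · rintro ⟨k, rfl, hk, hc⟩
    refine ⟨((0 : Int) + k, lines[k]), ?_, ?_⟩
    · rw [PySem.List.mem_enumerate_iff]
      exact ⟨k, hk, rfl⟩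
    · rw [List.getD_eq_getElem?_getD, List.getElem?_eq_getElem hk] at hc
      simp at hc
      simp [hc]

theorem pvCalls_sorted (lines : List (String × String)) :
    (pvCalls lines).Pairwise (· < ·) := by
  unfold pvCalls
  have hp := PySem.List.pairwise_lt_enumerate (xs := lines) (s := 0)
  rw [List.pairwise_filterMap]
  refine hp.imp_of_mem ?_
  intro a b _ _ hab x hx y hy
  split at hx
  · split at hy
    · simp only [Option.some.injEq] at hx hy
      omega
    · cases hy
  · cases hx

theorem pvScanB_drop_none (lines : List (String × String)) (s : Nat)
    (h : ∀ k : Nat, s < k → k < lines.length → (lines.getD k ("", "")).1 ≠ "call") :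
    pvScanB (lines.drop s) = none := by
  cases hds : lines.drop s with
  | nil => rw [pvScanB]
  | cons x tl =>
    have htl : tl = lines.drop (s+1) := by
      have := congrArg List.tail hds
      simpa [List.tail_drop] using this.symm
    rw [pvScanB]
    have hfi : tl.findIdx? (fun l => l.1 == "call") = none := by
      rw [List.findIdx?_eq_none_iff]
      intro a ha
      rw [htl] at ha
      obtain ⟨j, hj, hja⟩ := List.mem_iff_getElem.mp ha
      have hjl : s + 1 + j < lines.length := by
        have := hj; simp [List.length_drop] at this; omega
      have hgd : (lines.drop (s+1)).getD j ("", "") = a := by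
        rw [List.getD_eq_getElem?_getD, List.getElem?_eq_getElem hj, hja]
        rfl
      rw [pvGetD_drop] at hgd
      have := h (s+1+j) (by omega) hjl
      rw [hgd] at this
      simpa using this
    rw [hfi]
    rfl

theorem pvScanB_drop_some (lines : List (String × String)) (s k : Nat)
    (hs : s < k) (hk : k < lines.length)
    (hc : (lines.getD k ("", "")).1 = "call")
    (hmin : ∀ q : Nat, s < q → q < k → (lines.getD q ("", "")).1 ≠ "call") :
    pvScanB (lines.drop s) = some (k - s) := by
  have hds : lines.drop s = lines[s] :: lines.drop (s+1) :=
    List.drop_eq_getElem_cons (by omega)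
  rw [hds, pvScanB]
  have hfi : (lines.drop (s+1)).findIdx? (fun l => l.1 == "call") = some (k - s - 1) := by
    rw [List.findIdx?_eq_some_iff_getElem]
    have hlen : k - s - 1 < (lines.drop (s+1)).length := by
      simp [List.length_drop]; omega
    refine ⟨hlen, ?_, ?_⟩
    · have hgd : (lines.drop (s+1))[k-s-1] = (lines.drop (s+1)).getD (k-s-1) ("", "") := by
        rw [List.getD_eq_getElem?_getD, List.getElem?_eq_getElem hlen]
        rfl
      rw [hgd, pvGetD_drop]
      have : s + 1 + (k - s - 1) = k := by omega
      rw [this, hc]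
      rfl
    · intro j hj
      have hjlen : j < (lines.drop (s+1)).length := by omega
      have hgd : (lines.drop (s+1))[j] = (lines.drop (s+1)).getD j ("", "") := by
        rw [List.getD_eq_getElem?_getD, List.getElem?_eq_getElem hjlen]
        rfl
      rw [hgd, pvGetD_drop]
      have := hmin (s+1+j) (by omega) (by omega)
      simpa using this
  rw [hfi]
  simp only [Option.map_some, Option.some.injEq]
  omega

-- the head of a chain's emitted names is the chain's start
theorem pvProcess_fst_cons (name : String) (skips : List pvSkip) (cnt : Int)
    (g : PySem.Dict String (List (String × String))) (hg : g.keys.Nodup) :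
    (pvProcess name skips cnt g hg).1 = name :: ((pvProcess name skips cnt g hg).1).tail := by
  cases h : pvScanB ((g.get? name).getD []) with
  | none => rw [pvProcess_eq_none name skips cnt g hg h]; rfl
  | some k =>
    by_cases h1 : (((g.get? name).getD []).getD k ("", "")).2 = "__mulsi3"
    · rw [pvProcess_eq_mul name skips cnt g hg k h h1]; rfl
    · by_cases h2 : (((g.get? name).getD []).getD k ("", "")).2 = "__divsi3"
      · rw [pvProcess_eq_div name skips cnt g hg k h h1 h2]; rfl
      · rw [pvProcess_eq_other name skips cnt g hg k h h1 h2]; rfl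

-- B's fold over the precomputed call positions computes A's dict-driven chain
theorem pvSplit_eq (lines : List (String × String)) :
    ∀ (calls : List Int) (cur : String) (s : Nat) (out : List String) (skips : List pvSkip)
      (cnt : Int) (g : PySem.Dict String (List (String × String))) (hg : g.keys.Nodup),
    (g.get? cur).getD [] = lines.drop s →
    (∀ q ∈ calls, ∃ k : Nat, q = (k : Int) ∧ k < lines.length ∧ (lines.getD k ("", "")).1 = "call") →
    (∀ k : Nat, s < k → k < lines.length → (lines.getD k ("", "")).1 = "call" → (k : Int) ∈ calls) →
    calls.Pairwise (· < ·) →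
    pvSplit lines calls cur (s : Int) out skips cnt g =
      (out ++ ((pvProcess cur skips cnt g hg).1).tail,
       (pvProcess cur skips cnt g hg).2.1,
       (pvProcess cur skips cnt g hg).2.2.1,
       (pvProcess cur skips cnt g hg).2.2.2) := by
  intro calls
  induction calls with
  | nil =>
    intro cur s out skips cnt g hg hlv _ hcov _
    have hnone : pvScanB ((g.get? cur).getD []) = none := by
      rw [hlv]
      apply pvScanB_drop_none
      intro k hks hkl hc
      exact absurd (hcov k hks hkl hc) (List.not_mem_nil)
    rw [pvProcess_eq_none cur skips cnt g hg hnone]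
    simp [pvSplit]
  | cons p rest ih =>
    intro cur s out skips cnt g hg hlv hmem hcov hsorted
    by_cases hps : p ≤ (s : Int)
    · rw [pvSplit, if_pos hps]
      apply ih cur s out skips cnt g hg hlv
      · intro q hq; exact hmem q (List.mem_cons_of_mem _ hq)
      · intro k hks hkl hc
        have := hcov k hks hkl hc
        rcases List.mem_cons.mp this with heq | hmem'
        · omega
        · exact hmem'
      · exact hsorted.of_cons
    · obtain ⟨k, rfl, hkl, hc⟩ := hmem p (List.mem_cons_self)
      have hsk : s < k := by omega
      have hmin : ∀ q : Nat, s < q → q < k → (lines.getD q ("", "")).1 ≠ "call" := by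
        intro q hqs hqk hqc
        have hq := hcov q hqs (by omega) hqc
        rcases List.mem_cons.mp hq with heq | hmem'
        · have : q = k := by exact_mod_cast heq
          omega
        · have := (List.pairwise_cons.mp hsorted).1 _ hmem'
          omega
      have hrest_sorted : rest.Pairwise (· < ·) := hsorted.of_cons
      have hrest_gt : ∀ y ∈ rest, (k : Int) < y := (List.pairwise_cons.mp hsorted).1
      have hscan : pvScanB ((g.get? cur).getD []) = some (k - s) := by
        rw [hlv]
        exact pvScanB_drop_some lines s k hsk hkl hc hmin
      have hseg : ((g.get? cur).getD []).getD (k - s) ("", "") = lines.getD k ("", "") := by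
        rw [hlv, pvGetD_drop]
        congr 1
        omega
      have hgetp : PySem.List.pyGetD lines (k : Int) ("", "") = lines.getD k ("", "") :=
        PySem.List.pyGetD_natCast lines k ("", "")
      have hsl1 : PySem.List.slice lines (some (s : Int)) (some (k : Int))
          = (lines.drop s).take (k - s) := PySem.List.slice_natCast lines s k
      have hseg_take : ((g.get? cur).getD []).take (k - s) = (lines.drop s).take (k - s) := by
        rw [hlv]
      rw [pvSplit, if_neg hps]
      by_cases hmul : (lines.getD k ("", "")).2 = "__mulsi3"
      · rw [if_pos (by rw [hgetp]; exact hmul)]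
        rw [pvProcess_eq_mul cur skips cnt g hg (k - s) hscan (by rw [hseg]; exact hmul)]
        have hsl2 : PySem.List.slice lines (some ((k : Int) + 1)) none = lines.drop (k + 1) := by
          have hcast : (k : Int) + 1 = ((k + 1 : Nat) : Int) := by push_cast; ring
          rw [hcast]
          exact PySem.List.slice_from_natCast lines (k + 1)
        have hseg_drop : ((g.get? cur).getD []).drop (k - s + 1) = lines.drop (k + 1) := by
          rw [hlv, List.drop_drop]
          congr 1
          omega
        have hG : (((g.insert cur (((g.get? cur).getD []).take (k - s))).insert (pvName cnt "_0")
              [((g.get? cur).getD []).getD (k - s) ("", ""), ("j", pvName cnt "_1"), ("mv", "a0,a1")]).insert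
              (pvName cnt "_1") (((g.get? cur).getD []).drop (k - s + 1)))
            = (((g.insert cur (PySem.List.slice lines (some (s : Int)) (some (k : Int)))).insert (pvName cnt "_0")
              [PySem.List.pyGetD lines (k : Int) ("", ""), ("j", pvName cnt "_1"), ("mv", "a0,a1")]).insert
              (pvName cnt "_1") (PySem.List.slice lines (some ((k : Int) + 1)) none)) := by
          rw [hseg, hgetp, hsl1, hsl2, hseg_drop, hseg_take]
        set skips' := skips ++ [(pvName cnt "_0", 10, 0, "SASA_COND_AND", 1),
                   (pvName cnt "_0", 11, 0, "SASA_COND_AND", 2)] with hskips'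
        have hGnodup : ((((g.insert cur (PySem.List.slice lines (some (s : Int)) (some (k : Int)))).insert (pvName cnt "_0")
              [PySem.List.pyGetD lines (k : Int) ("", ""), ("j", pvName cnt "_1"), ("mv", "a0,a1")]).insert
              (pvName cnt "_1") (PySem.List.slice lines (some ((k : Int) + 1)) none))).keys.Nodup :=
          PySem.Dict.nodup_keys_insert _ _ _
            (PySem.Dict.nodup_keys_insert _ _ _ (PySem.Dict.nodup_keys_insert _ _ _ hg))
        have hcast1 : (k : Int) + 1 = ((k + 1 : Nat) : Int) := by push_cast; ring
        have hih := ih (pvName cnt "_1") (k + 1)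
          (out ++ [pvName cnt "_0", pvName cnt "_1"]) skips' (cnt + 1)
          _ hGnodup
          (by rw [PySem.Dict.get?_insert_self]
              simp only [Option.getD_some]
              rw [hsl2])
          (by intro q hq; exact hmem q (List.mem_cons_of_mem _ hq))
          (by intro m hms hml hmc
              have := hcov m (by omega) hml hmc
              rcases List.mem_cons.mp this with heq | hmem'
              · exfalso
                have : m = k := by exact_mod_cast heq
                omega
              · exact hmem')
          hrest_sorted
        simp only [hcast1] at hih ⊢
        rw [hih]
        have hhead := pvProcess_fst_cons (pvName cnt "_1") skips' (cnt + 1) _ hGnodup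
        simp only [hG]
        conv_rhs => rw [hhead]
        simp
      · rw [if_neg (by rw [hgetp]; exact hmul)]
        by_cases hdiv : (lines.getD k ("", "")).2 = "__divsi3"
        · rw [if_pos (by rw [hgetp]; exact hdiv)]
          rw [pvProcess_eq_div cur skips cnt g hg (k - s) hscan
            (by rw [hseg]; exact hmul) (by rw [hseg]; exact hdiv)]
          have hsl2 : PySem.List.slice lines (some (k : Int)) none = lines.drop k :=
            PySem.List.slice_from_natCast lines k
          have hseg_drop : ((g.get? cur).getD []).drop (k - s) = lines.drop k := by
            rw [hlv, List.drop_drop]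
            congr 1
            omega
          have hG : ((g.insert cur (((g.get? cur).getD []).take (k - s))).insert (pvName cnt "_0")
                (((g.get? cur).getD []).drop (k - s)))
              = ((g.insert cur (PySem.List.slice lines (some (s : Int)) (some (k : Int)))).insert (pvName cnt "_0")
                (PySem.List.slice lines (some (k : Int)) none)) := by
            rw [hsl1, hsl2, hseg_drop, hseg_take]
          set skips' := skips ++ [(pvName cnt "_0", 10, 0, "SASA_COND_AND", 1)] with hskips'
          have hGnodup : (((g.insert cur (PySem.List.slice lines (some (s : Int)) (some (k : Int)))).insert (pvName cnt "_0")
                (PySem.List.slice lines (some (k : Int)) none))).keys.Nodup :=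
            PySem.Dict.nodup_keys_insert _ _ _ (PySem.Dict.nodup_keys_insert _ _ _ hg)
          have hih := ih (pvName cnt "_0") k
            (out ++ [pvName cnt "_0"]) skips' (cnt + 1)
            _ hGnodup
            (by rw [PySem.Dict.get?_insert_self]
                simp only [Option.getD_some]
                rw [hsl2])
            (by intro q hq; exact hmem q (List.mem_cons_of_mem _ hq))
            (by intro m hms hml hmc
                have := hcov m (by omega) hml hmc
                rcases List.mem_cons.mp this with heq | hmem'
                · exfalso
                  have : m = k := by exact_mod_cast heq
                  omega
                · exact hmem')
            hrest_sorted
          rw [hih]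
          have hhead := pvProcess_fst_cons (pvName cnt "_0") skips' (cnt + 1) _ hGnodup
          simp only [hG]
          conv_rhs => rw [hhead]
          simp
        · rw [if_neg (by rw [hgetp]; exact hdiv)]
          rw [pvProcess_eq_other cur skips cnt g hg (k - s) hscan
            (by rw [hseg]; exact hmul) (by rw [hseg]; exact hdiv)]
          simp

-- B's outer loop computes the concatenation of chains
theorem pvRunB_eq (names : List String) :
    ∀ (out : List String) (skips : List pvSkip) (cnt : Int)
      (g : PySem.Dict String (List (String × String))) (hg : g.keys.Nodup),
    pvRunB names out skips cnt g =
      (out ++ (pvRun names skips cnt g hg).1, (pvRun names skips cnt g hg).2) := by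
  induction names with
  | nil =>
    intro out skips cnt g hg
    simp [pvRunB, pvRun]
  | cons n rest ih =>
    intro out skips cnt g hg
    rw [pvRunB]
    have hsplit := pvSplit_eq ((g.get? n).getD []) (pvCalls ((g.get? n).getD [])) n 0
      (out ++ [n]) skips cnt g hg
      (by rw [List.drop_zero])
      (fun q hq => (pvCalls_mem _ q).mp hq)
      (fun k _ hkl hc => (pvCalls_mem _ (k : Int)).mpr ⟨k, rfl, hkl, hc⟩)
      (pvCalls_sorted _)
    rw [show ((0 : Nat) : Int) = (0 : Int) from rfl] at hsplit
    rw [hsplit]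
    rw [ih _ _ _ _ (pvProcess_nodup n skips cnt g hg)]
    conv_rhs => rw [pvRun]
    have hhead := pvProcess_fst_cons n skips cnt g hg
    conv_rhs => rw [hhead]
    simp

-- ===== VERDICT (by name: the statement is the Claim_ definition above) =====
theorem find_skippable_regions_spec : Claim_equal_find_skippable_regions := by
  intro globs _
  unfold Spec_find_skippable_regions find_skippable_regions find_skippable_regions_alt
  dsimp only
  rw [pvLoopA_eq_run, pvRunB_eq _ _ _ _ _ (PySem.Dict.nodup_keys_ofList globs)]
  simp
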